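-- pv_equiv track=rewrite | github.com/IvanKalug-QA/codewars | Raffle_Run_What_Are_the_Odds.py | raffle_odds
-- ===== SOURCE A (Python) =====
-- from math import gcd
--
-- def raffle_odds(totals, purchased):
--     num = 1
--     den = 1
--     for total, bought in zip(totals, purchased):
--         lose_num = total - bought
--         lose_den = total
--         num *= lose_num
--         den *= lose_den
--     win_num = den - num
--     win_den = den
--     g = gcd(win_num, win_den)
--     win_num //= g
--     win_den //= g
--     return f"{win_num}/{win_den}"
-- ===== SOURCE B (Python) =====
-- from math import gcd
--
-- def _ptree(xs):
--     # balanced product of xs (divide and conquer keeps factors similar-sized)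
--     if len(xs) <= 1:
--         return xs[0] if xs else 1
--     m = len(xs) // 2
--     return _ptree(xs[:m]) * _ptree(xs[m:])
--
-- def raffle_odds(totals, purchased):
--     pairs = list(zip(totals, purchased))
--     den = _ptree([t for t, _ in pairs])
--     num = _ptree([t - b for t, b in pairs])
--     g = gcd(den - num, den)
--     return f"{(den - num) // g}/{den // g}"
-- ===== Notes on version B (the rewrite author's own statement) =====
-- stated objective: alternative
-- what changed: B computes the denominator product and the losing-numerator product with a recursive divide-and-conquer balanced product tree over the zipped rounds instead of A's linear left-fold accumulation, then complements and reduces once.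
import Mathlib
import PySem

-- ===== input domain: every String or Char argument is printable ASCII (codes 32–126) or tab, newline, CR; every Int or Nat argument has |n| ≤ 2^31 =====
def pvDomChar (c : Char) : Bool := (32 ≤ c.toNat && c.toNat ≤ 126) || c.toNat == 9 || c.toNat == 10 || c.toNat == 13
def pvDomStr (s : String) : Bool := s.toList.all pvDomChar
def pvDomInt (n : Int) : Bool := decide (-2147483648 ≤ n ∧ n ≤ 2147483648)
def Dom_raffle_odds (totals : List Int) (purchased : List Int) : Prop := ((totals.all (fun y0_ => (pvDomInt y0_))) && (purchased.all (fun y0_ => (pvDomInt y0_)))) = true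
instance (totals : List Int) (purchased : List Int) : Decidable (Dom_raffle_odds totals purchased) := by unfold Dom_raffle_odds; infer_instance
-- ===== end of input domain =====

-- B computes the two products with a recursive balanced product tree instead of A's linear fold,
-- then complements and reduces once; a genuinely different traversal of the rounds.


-- ===== PORT A =====
def raffle_odds (totals : List Int) (purchased : List Int) : String :=
  let st := (totals.zip purchased).foldl
    (fun (s : Int × Int) tb =>
      let lose_num := tb.1 - tb.2
      let lose_den := tb.1
      (s.1 * lose_num, s.2 * lose_den)) (1, 1)
  let win_num := st.2 - st.1
  let win_den := st.2
  let g : Int := Int.gcd win_num win_den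
  PySem.Int.toStr (PySem.Int.floordiv win_num g) ++ "/" ++ PySem.Int.toStr (PySem.Int.floordiv win_den g)

-- ===== PORT B =====
-- _ptree from Source B: balanced product by divide and conquer
def pvPtree (xs : List Int) : Int :=
  if xs.length ≤ 1 then
    match xs with
    | [] => 1
    | x :: _ => x
  else
    pvPtree (xs.take (xs.length / 2)) * pvPtree (xs.drop (xs.length / 2))
termination_by xs.length
decreasing_by
  · simp only [List.length_take]; omega
  · simp only [List.length_drop]; omega

def raffle_odds_alt (totals : List Int) (purchased : List Int) : String :=
  let pairs := totals.zip purchased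
  let den := pvPtree (pairs.map (fun p => p.1))
  let num := pvPtree (pairs.map (fun p => p.1 - p.2))
  let g : Int := Int.gcd (den - num) den
  PySem.Int.toStr (PySem.Int.floordiv (den - num) g) ++ "/" ++ PySem.Int.toStr (PySem.Int.floordiv den g)

-- ===== PRECONDITION & SPEC =====
-- Pre_ excludes exactly the inputs on which Python A raises ZeroDivisionError (and B raises too):
-- both the product of the zipped totals and the product of the zipped (total - bought) are zero, so gcd = 0.
def Pre_raffle_odds (totals : List Int) (purchased : List Int) : Prop :=
  ¬ ((((totals.zip purchased).map Prod.fst).prod = 0) ∧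
     (((totals.zip purchased).map (fun p => p.1 - p.2)).prod = 0))
instance (totals : List Int) (purchased : List Int) : Decidable (Pre_raffle_odds totals purchased) := by unfold Pre_raffle_odds; infer_instance
def pvWitness_raffle_odds : List Int × List Int := ([5, 6], [1, 2])

def Spec_raffle_odds (totals : List Int) (purchased : List Int) (out : String) : Prop := out = raffle_odds_alt totals purchased
instance (totals : List Int) (purchased : List Int) (out : String) : Decidable (Spec_raffle_odds totals purchased out) := by unfold Spec_raffle_odds; infer_instance

-- ===== CLAIM (what is proved, stated in full; the proofs are below) =====
def Claim_equal_raffle_odds : Prop := ∀ (totals : List Int) (purchased : List Int), Dom_raffle_odds totals purchased → Pre_raffle_odds totals purchased → Spec_raffle_odds totals purchased (raffle_odds totals purchased)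

-- ===== LEMMAS AND PROOFS =====

-- The balanced product tree computes the list product.
theorem pvPtree_eq_prod (xs : List Int) : pvPtree xs = xs.prod := by
  induction hn : xs.length using Nat.strong_induction_on generalizing xs with
  | _ n ih =>
    subst hn
    rw [pvPtree.eq_def]
    split
    · next h =>
      match xs, h with
      | [], _ => simp
      | [x], _ => simp
    · next h =>
      rw [ih _ (by simp only [List.length_take]; omega) _ rfl,
          ih _ (by simp only [List.length_drop]; omega) _ rfl,
          List.prod_take_mul_prod_drop]

-- A's fold accumulates exactly the two componentwise products.
theorem pv_foldA (l : List (Int × Int)) (num den : Int) :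
    l.foldl (fun (s : Int × Int) tb => (s.1 * (tb.1 - tb.2), s.2 * tb.1)) (num, den)
    = (num * (l.map (fun p => p.1 - p.2)).prod, den * (l.map Prod.fst).prod) := by
  induction l generalizing num den with
  | nil => simp
  | cons hd tl ih =>
    simp only [List.foldl_cons, List.map_cons, List.prod_cons, ih]
    rw [Prod.mk.injEq]
    constructor <;> ring

theorem raffle_odds_eq (totals purchased : List Int) :
    raffle_odds totals purchased = raffle_odds_alt totals purchased := by
  unfold raffle_odds raffle_odds_alt
  simp only [pv_foldA, pvPtree_eq_prod, one_mul]

-- ===== VERDICT (by name: the statement is the Claim_ definition above) =====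
theorem raffle_odds_spec : Claim_equal_raffle_odds := by
  intro totals purchased _ _
  unfold Spec_raffle_odds
  exact raffle_odds_eq totals purchased
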